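-- pv_equiv track=rewrite | github.com/miloczek/Projekty-II-UWR | Mój Python/Zadanie python/lista 11/podstaw.py | przypisz
-- ===== SOURCE A (Python) =====
-- def przypisz(s):
--     litery=list(s)
--     D={}
--     licznik=1
--     for i in range(len(litery)):    #przyporządkowuje kolejnym literom słownika, kolejne wartości liczbowe
--         if litery[i] not in D:
--             D[litery[i]] = licznik
--             licznik+=1
--     return D
-- ===== SOURCE B (Python) =====
-- def przypisz(s):
--     order = sorted(set(s), key=s.find)
--     return {c: k for k, c in enumerate(order, 1)}
-- ===== Notes on version B (the rewrite author's own statement) =====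
-- stated objective: alternative
-- what changed: Replaces A's single ordered scan with a membership guard and a manual counter by an unordered set of the characters, a sort keyed by each character's first-occurrence index (s.find), and one enumerate pass assigning 1-based ranks.
import Mathlib
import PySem

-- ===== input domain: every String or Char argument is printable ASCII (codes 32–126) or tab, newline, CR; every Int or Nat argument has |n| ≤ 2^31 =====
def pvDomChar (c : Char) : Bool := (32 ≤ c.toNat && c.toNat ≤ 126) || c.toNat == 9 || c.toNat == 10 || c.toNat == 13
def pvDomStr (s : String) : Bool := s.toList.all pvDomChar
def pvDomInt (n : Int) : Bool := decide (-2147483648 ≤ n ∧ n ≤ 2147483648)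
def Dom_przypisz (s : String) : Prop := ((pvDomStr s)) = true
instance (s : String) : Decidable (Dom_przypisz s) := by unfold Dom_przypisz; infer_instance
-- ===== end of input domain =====

-- B replaces A's ordered scan with a guard and manual counter by: take the set of
-- characters, sort it by first-occurrence index (s.find), enumerate from 1 (alternative; same result).

-- ===== PORT A =====
-- A's loop step over the state (D, licznik)
def pvStepA (st : PySem.Dict String Int × Int) (x : String) : PySem.Dict String Int × Int :=
  if st.1.contains x then st else (st.1.insert x st.2, st.2 + 1)

def przypisz (s : String) : List (String × Int) :=
  let litery : List String := s.toList.map (fun c => String.ofList [c])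
  let res := (PySem.List.pyRange 0 (litery.length : Int) 1).foldl
    (fun st i => pvStepA st (PySem.List.pyGetD litery i ""))
    (PySem.Dict.empty, 1)
  res.1.items

-- ===== PORT B =====
def przypisz_alt (s : String) : List (String × Int) :=
  let order := PySem.List.sorted
    (PySem.Set.ofList (s.toList.map (fun c => String.ofList [c])))
    (fun c => PySem.Str.find s c)
  (PySem.List.enumerate order 1).map (fun p => (p.2, p.1))

-- ===== PRECONDITION & SPEC =====
def Spec_przypisz (s : String) (out : List (String × Int)) : Prop := out = przypisz_alt s
instance (s : String) (out : List (String × Int)) : Decidable (Spec_przypisz s out) := by unfold Spec_przypisz; infer_instance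

-- ===== CLAIM (what is proved, stated in full; the proofs are below) =====
def Claim_equal_przypisz : Prop := ∀ (s : String), Dom_przypisz s → Spec_przypisz s (przypisz s)

-- ===== LEMMAS AND PROOFS =====

-- [a] is a prefix of l iff l starts with a.
theorem pvSingleton_prefix {α : Type} (a : α) (l : List α) : [a] <+: l ↔ l.head? = some a := by
  constructor
  · rintro ⟨t, rfl⟩; rfl
  · intro h
    cases l with
    | nil => simp at h
    | cons x t =>
      simp only [List.head?_cons, Option.some.injEq] at h
      exact ⟨t, by simp [h]⟩

-- s.find of a single character present in s is the index of its first occurrence.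
theorem pvFind_singleton (cs : List Char) (ch : Char) (h : ch ∈ cs) :
    PySem.Chars.find cs [ch] = (cs.idxOf ch : Int) := by
  have hinf : [ch] <:+: cs := by
    obtain ⟨p, t, rfl⟩ := List.append_of_mem h
    exact ⟨p, t, by simp⟩
  have hne : PySem.Chars.find cs [ch] ≠ -1 := (PySem.Chars.find_ne_neg_one_iff cs [ch]).2 hinf
  have hne0 : PySem.Chars.findFrom cs [ch] ((0 : Nat) : Int) ≠ -1 := by
    simpa using hne
  obtain ⟨h0, hpre, hmin⟩ := PySem.Chars.findFrom_natCast_spec cs [ch] 0 (Nat.zero_le _) hne0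
  rw [show ((0 : Nat) : Int) = 0 by norm_num, PySem.Chars.findFrom_zero] at h0 hpre hmin
  -- first-occurrence index from idxOf?
  obtain ⟨i, hi⟩ : ∃ i, List.idxOf? ch cs = some i := by
    cases hx : List.idxOf? ch cs with
    | none => exact absurd (List.idxOf?_eq_none_iff.1 hx) (by simpa using h)
    | some i => exact ⟨i, rfl⟩
  obtain ⟨hilen, hie, himin⟩ := List.idxOf?_eq_some_iff.1 hi
  have hidx : cs.idxOf ch = i := by
    rw [List.idxOf_eq_getD_idxOf?, hi]; rfl
  set n : Nat := (PySem.Chars.find cs [ch]).toNat with hn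
  have hgetn : cs[n]? = some ch := by
    have := (pvSingleton_prefix ch (cs.drop n)).1 hpre
    simpa [List.head?_drop] using this
  have hnlen : n < cs.length := by
    by_contra hc
    rw [List.getElem?_eq_none (Nat.le_of_not_lt hc)] at hgetn
    cases hgetn
  have hni : n = i := by
    rcases lt_trichotomy n i with hlt | heq | hgt
    · exact absurd (by simpa [List.getElem?_eq_getElem hnlen] using hgetn) (himin n hlt)
    · exact heq
    · exact absurd ((pvSingleton_prefix ch (cs.drop i)).2 (by simp [List.head?_drop, List.getElem?_eq_getElem hilen, hie]))
        (hmin i (Nat.zero_le _) hgt)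
  have : PySem.Chars.find cs [ch] = (n : Int) := (Int.toNat_of_nonneg h0).symm
  rw [this, hni, hidx]

-- dedup commutes with mapping an injective function.
theorem pvDedup_map {α β : Type} [DecidableEq α] [DecidableEq β]
    (f : α → β) (hinj : Function.Injective f) (cs : List α) :
    PySem.List.dedup (cs.map f) = (PySem.List.dedup cs).map f := by
  induction cs with
  | nil => simp [PySem.List.dedup, PySem.Set.ofList]
  | cons x cs ih =>
    rw [List.map_cons, PySem.List.dedup_eq_ofList, PySem.List.dedup_eq_ofList,
      PySem.Set.ofList_cons, PySem.Set.ofList_cons, List.map_cons]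
    rw [PySem.List.dedup_eq_ofList, PySem.List.dedup_eq_ofList] at ih
    rw [ih]
    simp only [PySem.Set.discard, List.filter_map]
    congr 1
    refine congrArg (List.map f) (List.filter_congr ?_)
    intro y _
    simp only [Function.comp_apply]
    by_cases hyx : y = x
    · simp [hyx]
    · have hf : f y ≠ f x := fun hfe => hyx (hinj hfe)
      simp [hyx, hf]

-- the dedup of a list is strictly increasing in first-occurrence index.
theorem pvPairwise_idxOf_dedup {α : Type} [DecidableEq α] (cs : List α) :
    (PySem.List.dedup cs).Pairwise (fun a b => cs.idxOf a < cs.idxOf b) := by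
  induction cs with
  | nil => simp [PySem.List.dedup, PySem.Set.ofList]
  | cons x cs ih =>
    rw [PySem.List.dedup_eq_ofList, PySem.Set.ofList_cons]
    rw [PySem.List.dedup_eq_ofList] at ih
    constructor
    · intro b hb
      have hb' := (PySem.Set.mem_discard (PySem.Set.ofList cs) x b).1 hb
      rw [List.idxOf_cons_self, List.idxOf_cons_ne _ (fun hxb => hb'.2 hxb.symm)]
      omega
    · have h2 : ((PySem.Set.ofList cs).discard x).Pairwise (fun a b => cs.idxOf a < cs.idxOf b) := by
        simpa only [PySem.Set.discard] using List.Pairwise.filter (fun y => !y == x) ih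
      refine h2.imp_of_mem ?_
      intro a b ha hb hab
      have ha' := (PySem.Set.mem_discard (PySem.Set.ofList cs) x a).1 ha
      have hb' := (PySem.Set.mem_discard (PySem.Set.ofList cs) x b).1 hb
      rw [List.idxOf_cons_ne _ (fun hxa => ha'.2 hxa.symm),
        List.idxOf_cons_ne _ (fun hxb => hb'.2 hxb.symm)]
      omega

-- B's sort by first-occurrence index returns exactly the first-appearance dedup.
theorem pvSorted_eq_dedup (s : String) :
    PySem.List.sorted (PySem.Set.ofList (s.toList.map (fun c => String.ofList [c])))
      (fun c => PySem.Str.find s c)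
      = PySem.List.dedup (s.toList.map (fun c => String.ofList [c])) := by
  have hinj : Function.Injective (fun c : Char => String.ofList [c]) := by
    intro a b hab
    have := congrArg String.toList hab
    simpa using this
  apply PySem.List.sorted_eq_of_perm_of_pairwise_lt
  · rw [PySem.List.dedup_eq_ofList]
  · rw [pvDedup_map _ hinj, List.pairwise_map]
    refine (pvPairwise_idxOf_dedup s.toList).imp_of_mem ?_
    intro a b ha hb hab
    have ha' : a ∈ s.toList := (PySem.List.mem_dedup _ _).1 ha
    have hb' : b ∈ s.toList := (PySem.List.mem_dedup _ _).1 hb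
    simp only [PySem.Str.find_eq]
    have hta : (String.ofList [a]).toList = [a] := by simp
    have htb : (String.ofList [b]).toList = [b] := by simp
    rw [hta, htb, pvFind_singleton _ _ ha', pvFind_singleton _ _ hb']
    exact_mod_cast hab

-- A's loop invariant: starting from a dict with distinct keys, the loop appends the
-- fresh first occurrences of l paired with consecutive counters.
theorem pvStepA_foldl (l : List String) (d : PySem.Dict String Int) (k : Int)
    (hnd : d.keys.Nodup) :
    (l.foldl pvStepA (d, k)).1.items
      = d.items ++ (PySem.List.enumerate
          ((PySem.Set.ofList l).filter (fun y => !(d.contains y))) k).map (fun p => (p.2, p.1)) := by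
  induction l generalizing d k with
  | nil => simp [PySem.Set.ofList_nil]
  | cons x l ih =>
    rw [List.foldl_cons]
    by_cases hx : d.contains x = true
    · have hstep : pvStepA (d, k) x = (d, k) := by simp [pvStepA, hx]
      rw [hstep, ih d k hnd, PySem.Set.ofList_cons]
      congr 2
      simp only [List.filter_cons, hx, Bool.not_true, PySem.Set.discard,
        Bool.false_eq_true, if_false, List.filter_filter]
      congr 1
      apply List.filter_congr
      intro y hy
      by_cases hyx : y = x <;> simp [hyx, hx]
    · have hx' : d.contains x = false := by simpa using hx
      have hstep : pvStepA (d, k) x = (d.insert x k, k + 1) := by simp [pvStepA, hx']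
      rw [hstep, ih (d.insert x k) (k + 1) (PySem.Dict.nodup_keys_insert d x k hnd),
        PySem.Dict.items_insert_of_not_contains (h := hx'), PySem.Set.ofList_cons]
      simp only [List.filter_cons, hx', Bool.not_false, PySem.Set.discard, if_true,
        List.filter_filter, List.append_assoc, List.cons_append, List.nil_append,
        PySem.List.enumerate_cons, List.map_cons]
      congr 3
      congr 1
      apply List.filter_congr
      intro y hy
      by_cases hyx : y = x <;> simp [hyx, PySem.Dict.contains_insert, hx', Bool.and_comm]

-- ===== VERDICT (by name: the statement is the Claim_ definition above) =====
theorem przypisz_spec : Claim_equal_przypisz := by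
  intro s _
  unfold Spec_przypisz przypisz przypisz_alt
  dsimp only
  rw [PySem.List.foldl_pyRange_zero_pyGetD']
  rw [pvStepA_foldl _ PySem.Dict.empty 1 (by simp [PySem.Dict.keys_empty])]
  rw [pvSorted_eq_dedup, PySem.List.dedup_eq_ofList]
  simp [PySem.Dict.empty]
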